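-- pv_equiv track=rewrite | github.com/evertonbrunolima/calculo_numerico | metodo_glass_jacob_matriz.py | matriz_x
-- ===== SOURCE A (Python) =====
-- def matriz_x(pontos, grau):
--     Somatorio_grau = []
--     for i in range(0,(2*grau+1)):
--         if i==0:
--             Somatorio_grau.append(len(pontos))
--         else:
--             somatorio = 0
--             for x in pontos:
--                 somatorio += x[0]**i
--             Somatorio_grau.append(somatorio)
--
--     resultado = []
--     for i in range (0,grau+1):
--         linha = []
--         for y in range (0,grau+1):
--             linha.append(Somatorio_grau[i+y])
--         resultado.append(linha)
--
--     return resultado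
-- ===== SOURCE B (Python) =====
-- def matriz_x(pontos, grau):
--     return [[sum(p[0] ** (i + j) for p in pontos) for j in range(grau + 1)]
--             for i in range(grau + 1)]
-- ===== Notes on version B (the rewrite author's own statement) =====
-- stated objective: simpler
-- what changed: Drops A's precomputed power-sum table (and its special case for the 0th sum) and builds each matrix entry directly as the sum over the points of p[0]**(i+j), relying on 0**0 == 1.
import Mathlib
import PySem

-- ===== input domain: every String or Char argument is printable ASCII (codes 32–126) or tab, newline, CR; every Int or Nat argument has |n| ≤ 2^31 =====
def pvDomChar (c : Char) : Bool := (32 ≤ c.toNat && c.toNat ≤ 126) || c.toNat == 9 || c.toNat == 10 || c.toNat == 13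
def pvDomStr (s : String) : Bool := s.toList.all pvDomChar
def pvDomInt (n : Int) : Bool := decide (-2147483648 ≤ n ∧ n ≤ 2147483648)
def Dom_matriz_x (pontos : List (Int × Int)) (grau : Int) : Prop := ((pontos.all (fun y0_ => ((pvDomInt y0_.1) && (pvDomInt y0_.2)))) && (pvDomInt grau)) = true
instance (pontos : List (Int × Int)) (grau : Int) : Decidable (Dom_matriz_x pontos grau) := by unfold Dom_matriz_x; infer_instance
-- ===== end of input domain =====

-- B drops A's precomputed power-sum table (and its i==0 special case) and computes each
-- matrix entry directly as the sum over the points of p[0]**(i+j): simpler, not faster.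

-- ===== PORT A =====
-- Somatorio_grau[i+y] is always in range (i+y ≤ 2*grau), so pyGetD with default 0 is exact.
def matriz_x (pontos : List (Int × Int)) (grau : Int) : List (List Int) :=
  let somatorioGrau : List Int :=
    (PySem.List.pyRange 0 (2*grau+1) 1).foldl (fun acc i =>
      if i == 0 then acc ++ [(pontos.length : Int)]
      else acc ++ [pontos.foldl (fun s x => s + x.1 ^ i.toNat) 0]) []
  (PySem.List.pyRange 0 (grau+1) 1).foldl (fun resultado i =>
    resultado ++ [(PySem.List.pyRange 0 (grau+1) 1).foldl (fun linha y =>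
      linha ++ [PySem.List.pyGetD somatorioGrau (i+y) 0]) []]) []

-- ===== PORT B =====
def matriz_x_alt (pontos : List (Int × Int)) (grau : Int) : List (List Int) :=
  (PySem.List.pyRange 0 (grau+1) 1).map (fun i =>
    (PySem.List.pyRange 0 (grau+1) 1).map (fun j =>
      pontos.foldl (fun s p => s + p.1 ^ (i+j).toNat) 0))

-- ===== PRECONDITION & SPEC =====
def Spec_matriz_x (pontos : List (Int × Int)) (grau : Int) (out : List (List Int)) : Prop := out = matriz_x_alt pontos grau
instance (pontos : List (Int × Int)) (grau : Int) (out : List (List Int)) : Decidable (Spec_matriz_x pontos grau out) := by unfold Spec_matriz_x; infer_instance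

-- ===== CLAIM (what is proved, stated in full; the proofs are below) =====
def Claim_equal_matriz_x : Prop := ∀ (pontos : List (Int × Int)) (grau : Int), Dom_matriz_x pontos grau → Spec_matriz_x pontos grau (matriz_x pontos grau)

-- ===== LEMMAS AND PROOFS =====

-- ===== VERDICT (by name: the statement is the Claim_ definition above) =====
theorem matriz_x_spec : Claim_equal_matriz_x := by
  intro pontos grau _
  unfold Spec_matriz_x
  simp only [matriz_x, matriz_x_alt]
  rw [PySem.List.foldl_congr_mem (PySem.List.pyRange 0 (2*grau+1) 1)
      (fun acc i => if i == 0 then acc ++ [(pontos.length : Int)]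
                    else acc ++ [pontos.foldl (fun s x => s + x.1 ^ i.toNat) 0])
      (fun acc i => acc ++ [if i == 0 then (pontos.length : Int)
                            else pontos.foldl (fun s x => s + x.1 ^ i.toNat) 0])
      [] (fun acc i _ => by dsimp only; split <;> rfl)]
  simp only [PySem.List.foldl_append_singleton_eq_map, List.nil_append,
    PySem.List.pyRange_one, List.map_map]
  rw [List.map_inj_left]
  intro i hi
  simp only [Function.comp_apply]
  rw [List.map_inj_left]
  intro y hy
  simp only [Function.comp_apply, List.mem_range] at *
  have hsum : (0 + (i:Int)) + (0 + (y:Int)) = ((i + y : Nat) : Int) := by push_cast; ring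
  rw [hsum, PySem.List.pyGetD_natCast, PySem.List.getD_map_range _ _ _ _ (by omega : i + y < (2*grau+1-0).toNat)]
  by_cases h : i + y = 0
  · simp [h]
    rw [PySem.List.foldl_add pontos (fun _ => (1:Int)) 0, PySem.List.sum_map_const_int]
    ring
  · simp
    intro hc
    exact absurd (by exact_mod_cast hc) h
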